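-- pv_equiv track=rewrite | github.com/msb73/problems | bi.py | func
-- ===== SOURCE A (Python) =====
-- def func(n):
--     b = bin(n)
--     for i in range(len(b)):
--         try:
--             s = b[i] + b[i+1]
--             if s == '10' or s == '01':
--                 return 'Yes'
--         except IndexError:
--             return 'No'
-- ===== SOURCE B (Python) =====
-- def func(n):
--     s = format(abs(n), 'b')
--     return 'Yes' if len(set(s)) > 1 else 'No'
-- ===== Notes on version B (the rewrite author's own statement) =====
-- stated objective: simpler
-- what changed: Replaces the adjacent-pair scan over bin(n) (with its try/except IndexError control flow) by a uniformity test on the binary digits of |n|: with only two symbols, a non-uniform string necessarily contains an adjacent '10' or '01'.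
import Mathlib
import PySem

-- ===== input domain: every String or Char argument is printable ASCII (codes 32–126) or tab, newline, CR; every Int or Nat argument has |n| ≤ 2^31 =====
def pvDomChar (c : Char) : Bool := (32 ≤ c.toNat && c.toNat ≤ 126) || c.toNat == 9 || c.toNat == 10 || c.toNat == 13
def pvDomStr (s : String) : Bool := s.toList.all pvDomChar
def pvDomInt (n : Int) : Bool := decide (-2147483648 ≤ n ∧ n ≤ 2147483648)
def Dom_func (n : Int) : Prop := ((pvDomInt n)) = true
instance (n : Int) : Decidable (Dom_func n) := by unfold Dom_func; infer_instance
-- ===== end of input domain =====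

-- B replaces A's adjacent-pair scan over bin(n) (with try/except control flow) by a
-- uniformity test on the binary digits of |n| (simpler; with two symbols, non-uniform
-- implies an adjacent '10'/'01').

-- ===== PORT A =====
-- binary digits of a Nat, most significant first (empty for 0)
def pvBits (m : Nat) : List Char :=
  if h : m = 0 then [] else pvBits (m / 2) ++ [if m % 2 = 1 then '1' else '0']
decreasing_by exact Nat.div_lt_self (Nat.pos_of_ne_zero h) one_lt_two

-- b = bin(n): Python's bin(), as a list of characters ('-0b…' for negatives)
def pvBin (n : Int) : List Char :=
  (if n < 0 then ['-', '0', 'b'] else ['0', 'b']) ++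
    (if n.natAbs = 0 then ['0'] else pvBits n.natAbs)

-- the for-loop of A: b[i], b[i+1] via pyGet? (none = IndexError → return 'No')
def pvLoop (b : List Char) (i : Nat) : String :=
  if h : i < b.length then
    match PySem.List.pyGet? b (i : Int), PySem.List.pyGet? b ((i : Int) + 1) with
    | some c, some d =>
        if (c == '1' && d == '0') || (c == '0' && d == '1') then "Yes"
        else pvLoop b (i + 1)
    | _, _ => "No"
  else ""   -- range exhausted (unreachable: bin(n) is nonempty)
termination_by b.length - i

def func (n : Int) : String := pvLoop (pvBin n) 0

-- ===== PORT B =====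
-- s = format(abs(n), 'b'): binary digits of |n|, no prefix
def pvFmtB (m : Nat) : List Char := if m = 0 then ['0'] else pvBits m

def func_alt (n : Int) : String :=
  if (PySem.Set.ofList (pvFmtB n.natAbs)).length > 1 then "Yes" else "No"

-- ===== PRECONDITION & SPEC =====
def Spec_func (n : Int) (out : String) : Prop := out = func_alt n
instance (n : Int) (out : String) : Decidable (Spec_func n out) := by unfold Spec_func; infer_instance

-- ===== CLAIM (what is proved, stated in full; the proofs are below) =====
def Claim_equal_func : Prop := ∀ (n : Int), Dom_func n → Spec_func n (func n)

-- ===== LEMMAS AND PROOFS =====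

-- a plain structural scanner equal to pvLoop
def pvScan : List Char → String
  | [] => ""
  | [_] => "No"
  | c :: d :: t =>
      if (c == '1' && d == '0') || (c == '0' && d == '1') then "Yes"
      else pvScan (d :: t)

theorem pvLoop_eq_scan (b : List Char) (i : Nat) : pvLoop b i = pvScan (b.drop i) := by
  generalize hk : b.length - i = k
  induction k generalizing i with
  | zero =>
    have hi : b.length ≤ i := by omega
    rw [pvLoop, List.drop_eq_nil_of_le hi]
    simp [Nat.not_lt.mpr hi, pvScan]
  | succ k ih =>
    by_cases h : i < b.length
    · rw [pvLoop, dif_pos h]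
      rw [PySem.List.pyGet?_natCast]
      by_cases h2 : i + 1 < b.length
      · have : ((i : Int) + 1) = ((i + 1 : Nat) : Int) := by push_cast; ring
        rw [this, PySem.List.pyGet?_natCast]
        rw [List.getElem?_eq_getElem h, List.getElem?_eq_getElem h2]
        rw [List.drop_eq_getElem_cons h, List.drop_eq_getElem_cons h2]
        simp only [pvScan]
        split
        · rfl
        · rw [ih (i + 1) (by omega), List.drop_eq_getElem_cons h2]
      · have : ((i : Int) + 1) = ((i + 1 : Nat) : Int) := by push_cast; ring
        rw [this, PySem.List.pyGet?_natCast]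
        rw [List.getElem?_eq_getElem h, List.getElem?_eq_none (by omega)]
        have hd : b.drop i = [b[i]] := by
          rw [List.drop_eq_getElem_cons h, List.drop_eq_nil_of_le (by omega)]
        rw [hd]; rfl
    · rw [pvLoop, dif_neg h, List.drop_eq_nil_of_le (by omega)]; rfl

theorem pvBits_binary : ∀ m, ∀ c ∈ pvBits m, c = '0' ∨ c = '1' := by
  intro m
  induction m using Nat.strong_induction_on with
  | _ m ih =>
    intro c hc
    rw [pvBits] at hc
    split at hc
    · simp at hc
    · rename_i h
      simp only [List.mem_append, List.mem_singleton] at hc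
      rcases hc with h1 | h1
      · exact ih (m / 2) (Nat.div_lt_self (Nat.pos_of_ne_zero h) one_lt_two) c h1
      · subst h1; split <;> simp

theorem pvFmtB_binary (m : Nat) : ∀ c ∈ pvFmtB m, c = '0' ∨ c = '1' := by
  intro c hc
  rw [pvFmtB] at hc
  split at hc
  · simp at hc; simp [hc]
  · exact pvBits_binary m c hc

theorem pvBits_ne_nil (m : Nat) (h : m ≠ 0) : pvBits m ≠ [] := by
  rw [pvBits, dif_neg h]; simp

theorem pvFmtB_ne_nil (m : Nat) : pvFmtB m ≠ [] := by
  rw [pvFmtB]; split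
  · simp
  · exact pvBits_ne_nil _ ‹_›

-- if all characters are binary and all equal, the scan returns "No"
theorem scan_no : ∀ d : List Char, d ≠ [] → (∀ a ∈ d, ∀ b ∈ d, a = b) →
    pvScan d = "No" := by
  intro d
  induction d with
  | nil => intro h; exact absurd rfl h
  | cons c t ih =>
    intro _ huni
    match t with
    | [] => rfl
    | e :: t' =>
      have hce : c = e := huni c (by simp) e (by simp)
      subst hce
      rw [pvScan]
      have hcond : ((c == '1' && c == '0') || (c == '0' && c == '1')) = false := by
        by_cases h1 : c = '1' <;> by_cases h0 : c = '0' <;> simp_all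
      rw [hcond]
      simp only [Bool.false_eq_true, if_false]
      exact ih (by simp) (fun a ha b hb => huni a (by simp [ha]) b (by simp [hb]))

-- if characters are binary and two of them differ, the scan returns "Yes"
theorem scan_yes : ∀ d : List Char, (∀ c ∈ d, c = '0' ∨ c = '1') →
    (∃ a ∈ d, ∃ b ∈ d, a ≠ b) → pvScan d = "Yes" := by
  intro d
  induction d with
  | nil => rintro _ ⟨a, ha, _⟩; simp at ha
  | cons c t ih =>
    rintro hbin ⟨a, ha, b, hb, hab⟩
    match t with
    | [] =>
      simp only [List.mem_singleton] at ha hb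
      exact absurd (ha.trans hb.symm) hab
    | e :: t' =>
      rw [pvScan]
      by_cases hce : c = e
      · subst hce
        have hcond : ((c == '1' && c == '0') || (c == '0' && c == '1')) = false := by
          by_cases h1 : c = '1' <;> by_cases h0 : c = '0' <;> simp_all
        rw [hcond]
        simp only [Bool.false_eq_true, if_false]
        apply ih (fun x hx => hbin x (by simp [List.mem_cons] at hx ⊢; tauto))
        -- move the differing pair into c :: t' = e :: t' (c = e)
        rcases List.mem_cons.mp ha with ha' | ha'
        · rcases List.mem_cons.mp hb with hb' | hb'
          · exact absurd (ha'.trans hb'.symm) hab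
          · exact ⟨a, by simp [ha'], b, hb', hab⟩
        · rcases List.mem_cons.mp hb with hb' | hb'
          · exact ⟨a, ha', b, by simp [hb'], hab⟩
          · exact ⟨a, ha', b, hb', hab⟩
      · have h1 : c = '0' ∨ c = '1' := hbin c (by simp)
        have h2 : e = '0' ∨ e = '1' := hbin e (by simp)
        have hcond : ((c == '1' && e == '0') || (c == '0' && e == '1')) = true := by
          rcases h1 with h1 | h1 <;> rcases h2 with h2 | h2 <;> simp_all
        rw [hcond]; rfl

-- set(s) has > 1 element iff two elements of s differ
theorem set_len_gt_one (d : List Char) (hne : d ≠ []) :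
    (PySem.Set.ofList d).length > 1 ↔ ∃ a ∈ d, ∃ b ∈ d, a ≠ b := by
  constructor
  · intro hlen
    match hs : PySem.Set.ofList d with
    | [] => rw [hs] at hlen; simp at hlen
    | [_] => rw [hs] at hlen; simp at hlen
    | a :: b :: t =>
      have hnd : (PySem.Set.ofList d).Nodup := PySem.Set.nodup_ofList d
      rw [hs] at hnd
      have hab : a ≠ b := by
        intro h; subst h; exact (List.nodup_cons.mp hnd).1 (by simp)
      have hma : a ∈ d := by
        rw [← PySem.Set.mem_ofList d a, hs]; simp
      have hmb : b ∈ d := by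
        rw [← PySem.Set.mem_ofList d b, hs]; simp
      exact ⟨a, hma, b, hmb, hab⟩
  · rintro ⟨a, ha, b, hb, hab⟩
    by_contra hlen
    have hle : (PySem.Set.ofList d).length ≤ 1 := by omega
    have ha' : a ∈ PySem.Set.ofList d := (PySem.Set.mem_ofList d a).mpr ha
    have hb' : b ∈ PySem.Set.ofList d := (PySem.Set.mem_ofList d b).mpr hb
    match hs : PySem.Set.ofList d with
    | [] => rw [hs] at ha'; simp at ha'
    | [x] =>
      rw [hs] at ha' hb'
      simp at ha' hb'
      exact hab (ha'.trans hb'.symm)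
    | x :: y :: t => rw [hs] at hle; simp at hle

-- scanning bin(n) equals scanning just the digit part
theorem scan_bin (n : Int) : pvScan (pvBin n) = pvScan (pvFmtB n.natAbs) := by
  obtain ⟨c, t, hd⟩ : ∃ c t, pvFmtB n.natAbs = c :: t := by
    match h : pvFmtB n.natAbs with
    | [] => exact absurd h (pvFmtB_ne_nil _)
    | c :: t => exact ⟨c, t, rfl⟩
  have hc : c = '0' ∨ c = '1' := pvFmtB_binary n.natAbs c (by rw [hd]; simp)
  have hdig : (if n.natAbs = 0 then ['0'] else pvBits n.natAbs) = pvFmtB n.natAbs := by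
    rw [pvFmtB]
  rw [pvBin, hdig, hd]
  split
  · -- '-' :: '0' :: 'b' :: c :: t
    show pvScan ('-' :: '0' :: 'b' :: c :: t) = _
    rw [pvScan, if_neg (by decide), pvScan, if_neg (by decide), pvScan]
    rcases hc with hc | hc <;> subst hc <;> rw [if_neg (by decide)]
  · show pvScan ('0' :: 'b' :: c :: t) = _
    rw [pvScan, if_neg (by decide), pvScan]
    rcases hc with hc | hc <;> subst hc <;> rw [if_neg (by decide)]

-- ===== VERDICT (by name: the statement is the Claim_ definition above) =====
theorem func_spec : Claim_equal_func := by
  intro n _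
  unfold Spec_func func func_alt
  rw [pvLoop_eq_scan, List.drop_zero, scan_bin]
  set d := pvFmtB n.natAbs with hd
  by_cases h : ∃ a ∈ d, ∃ b ∈ d, a ≠ b
  · rw [scan_yes d (pvFmtB_binary n.natAbs) h,
        if_pos ((set_len_gt_one d (pvFmtB_ne_nil _)).mpr h)]
  · push_neg at h
    rw [scan_no d (pvFmtB_ne_nil _) (fun a ha b hb => h a ha b hb)]
    rw [if_neg (fun hg => by
      obtain ⟨a, ha, b, hb, hab⟩ := (set_len_gt_one d (pvFmtB_ne_nil _)).mp hg
      exact hab (h a ha b hb))]
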